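-- pv_equiv track=rewrite | github.com/JoshuaYang-Taiwan/CodeFights | Arcade/The Core/30_appleBoxes.py | appleBoxes
-- ===== SOURCE A (Python) =====
-- def appleBoxes(k):
--     count = 0
--     for i in range(1,k+1):
--         if i % 2 != 0:
--             count -= i**2
--         else:
--             count += i**2
--     return count
-- ===== SOURCE B (Python) =====
-- def appleBoxes(k):
--     if k <= 0:
--         return 0
--     half = k * (k + 1) // 2
--     return half if k % 2 == 0 else -half
-- ===== Notes on version B (the rewrite author's own statement) =====
-- stated objective: faster
-- what changed: Replaced the O(k) loop over range(1,k+1) with the closed-form formula (-1)^k * k*(k+1)/2.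
import Mathlib
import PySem

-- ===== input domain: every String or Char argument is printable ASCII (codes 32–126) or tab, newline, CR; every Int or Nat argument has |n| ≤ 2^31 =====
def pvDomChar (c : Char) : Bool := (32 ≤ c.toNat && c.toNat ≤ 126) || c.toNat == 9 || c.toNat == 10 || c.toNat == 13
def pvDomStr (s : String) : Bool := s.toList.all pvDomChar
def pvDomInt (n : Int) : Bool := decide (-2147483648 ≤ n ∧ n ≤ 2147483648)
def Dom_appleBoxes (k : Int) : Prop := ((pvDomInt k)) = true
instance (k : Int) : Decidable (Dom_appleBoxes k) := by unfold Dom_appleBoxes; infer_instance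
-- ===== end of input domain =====

-- B replaces A's O(k) summation loop with the closed-form formula (-1)^k * k*(k+1)//2 (objective: faster).

-- ===== PORT A =====
def appleBoxes (k : Int) : Int :=
  (PySem.List.pyRange 1 (k + 1) 1).foldl
    (fun count i => if PySem.Int.mod i 2 ≠ 0 then count - i ^ 2 else count + i ^ 2) 0

-- ===== PORT B =====
def appleBoxes_alt (k : Int) : Int :=
  if k ≤ 0 then 0
  else
    let half := PySem.Int.floordiv (k * (k + 1)) 2
    if PySem.Int.mod k 2 = 0 then half else -half

-- ===== PRECONDITION & SPEC =====
def Spec_appleBoxes (k : Int) (out : Int) : Prop := out = appleBoxes_alt k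
instance (k : Int) (out : Int) : Decidable (Spec_appleBoxes k out) := by unfold Spec_appleBoxes; infer_instance

-- ===== CLAIM (what is proved, stated in full; the proofs are below) =====
def Claim_equal_appleBoxes : Prop := ∀ (k : Int), Dom_appleBoxes k → Spec_appleBoxes k (appleBoxes k)

-- ===== LEMMAS AND PROOFS =====

lemma appleBoxes_nat (n : Nat) : appleBoxes (n : Int) = appleBoxes_alt (n : Int) := by
  induction n with
  | zero => decide
  | succ m ih =>
    have hrange : PySem.List.pyRange 1 ((m : Int) + 1 + 1) 1
        = PySem.List.pyRange 1 ((m : Int) + 1) 1 ++ [(m : Int) + 1] :=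
      PySem.List.pyRange_one_succ_right (by omega)
    have hA : appleBoxes ((m + 1 : Nat) : Int)
        = (if PySem.Int.mod ((m : Int) + 1) 2 ≠ 0
           then appleBoxes (m : Int) - ((m : Int) + 1) ^ 2
           else appleBoxes (m : Int) + ((m : Int) + 1) ^ 2) := by
      simp only [appleBoxes, Nat.cast_add, Nat.cast_one, hrange, List.foldl_append, List.foldl]
    rw [hA, ih]
    -- now pure arithmetic on the closed form
    have hmod : ∀ a : Int, PySem.Int.mod a 2 = a % 2 :=
      fun a => PySem.Int.mod_eq_emod_of_pos (by omega)
    have hdiv : ∀ a : Int, PySem.Int.floordiv a 2 = a / 2 :=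
      fun a => PySem.Int.floordiv_eq_ediv_of_pos (by omega)
    have h0 : (0 : Int) ≤ (m : Int) := Int.natCast_nonneg m
    simp only [appleBoxes_alt, hmod, hdiv]
    push_cast
    generalize (m : Int) = n at *
    have h2a : 2 * (n * (n + 1) / 2) = n * (n + 1) := by
      have h := Int.even_iff.mp (Int.even_mul_succ_self n); omega
    have h2b : 2 * ((n + 1) * (n + 1 + 1) / 2) = (n + 1) * (n + 1 + 1) := by
      have h := Int.even_iff.mp (Int.even_mul_succ_self (n + 1)); omega
    have hsq : 2 * (n + 1) ^ 2 = n * (n + 1) + (n + 1) * (n + 1 + 1) := by ring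
    rcases eq_or_lt_of_le h0 with hz | hpos
    · rw [← hz]; norm_num
    · split_ifs <;> first | (exfalso; omega) | linarith

-- ===== VERDICT (by name: the statement is the Claim_ definition above) =====
theorem appleBoxes_spec : Claim_equal_appleBoxes := by
  intro k _
  unfold Spec_appleBoxes
  by_cases hk : k ≤ 0
  · have hnil : PySem.List.pyRange 1 (k + 1) 1 = [] :=
      PySem.List.pyRange_one_eq_nil (by omega)
    simp [appleBoxes, appleBoxes_alt, hnil, hk]
  · have hk' : k = ((k.toNat : Nat) : Int) := by omega
    rw [hk']
    exact appleBoxes_nat k.toNat
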